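-- pv_equiv track=rewrite | github.com/nangman-infra/touch-browser | demo/generate-terminal-demo.py | fit_lines_to_height
-- ===== SOURCE A (Python) =====
-- def fit_lines_to_height(
--     lines: list[str],
--     max_height: int,
--     line_height_value: int,
--     spacing: int,
-- ) -> list[str]:
--     if not lines:
--         return [""]
--
--     fitted: list[str] = []
--     current_height = 0
--     for line in lines:
--         additional = line_height_value if not fitted else line_height_value + spacing
--         if current_height + additional > max_height:
--             if fitted:
--                 fitted[-1] = truncate(fitted[-1], max(8, len(fitted[-1]) - 1))
--             return fitted
--         fitted.append(line)
--         current_height += additional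
--
--     return fitted
--
-- def truncate(text: str, limit: int) -> str:
--     return text if len(text) <= limit else text[: limit - 3] + "..."
-- ===== SOURCE B (Python) =====
-- def fit_lines_to_height(
--     lines: list[str],
--     max_height: int,
--     line_height_value: int,
--     spacing: int,
-- ) -> list[str]:
--     if not lines:
--         return [""]
--     n = len(lines)
--     # closed form: the first k lines occupy lhv + (k-1)*(lhv+spacing);
--     # solve for the number of fitting lines directly, no scan
--     d = line_height_value + spacing
--     budget = max_height - line_height_value
--     if budget < 0:
--         k = 0
--     elif d <= 0:
--         k = n
--     else:
--         k = min(n, budget // d + 1)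
--     if k == n:
--         return list(lines)
--     fitted = lines[:k]
--     if fitted:
--         last = fitted[-1]
--         fitted[-1] = last if len(last) <= 8 else last[:len(last) - 4] + "..."
--     return fitted
-- ===== Notes on version B (the rewrite author's own statement) =====
-- stated objective: alternative
-- what changed: A scans the lines accumulating heights and breaks at the first overflow; B does no scan at all: since the cumulative heights form an arithmetic progression, it computes the number of fitting lines k in closed form by one integer floor division (budget // (lhv+spacing) + 1, guarded for negative budget and non-positive step), slices the prefix, and truncates the last kept line by a direct formula.
import Mathlib
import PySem

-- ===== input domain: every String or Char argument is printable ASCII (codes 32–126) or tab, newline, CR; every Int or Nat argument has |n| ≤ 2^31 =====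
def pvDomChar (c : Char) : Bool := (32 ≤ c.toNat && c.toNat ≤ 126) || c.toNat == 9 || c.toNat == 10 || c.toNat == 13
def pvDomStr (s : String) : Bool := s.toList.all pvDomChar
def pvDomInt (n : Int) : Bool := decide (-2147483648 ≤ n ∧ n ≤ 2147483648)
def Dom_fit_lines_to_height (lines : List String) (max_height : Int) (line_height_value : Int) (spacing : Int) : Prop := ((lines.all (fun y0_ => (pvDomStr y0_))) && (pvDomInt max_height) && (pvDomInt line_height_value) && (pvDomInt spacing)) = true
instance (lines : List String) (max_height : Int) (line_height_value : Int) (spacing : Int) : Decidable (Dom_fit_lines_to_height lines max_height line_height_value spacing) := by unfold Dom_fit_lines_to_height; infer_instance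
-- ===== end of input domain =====

-- B replaces A's accumulate-and-break scan by a closed-form computation of the number of
-- fitting lines (one integer floor division) followed by a slice (objective: alternative).

-- ===== PORT A =====
-- truncate(text, limit) from the Python module (string ops on the code-point list, exact on ASCII)
def pvTruncateA (text : String) (limit : Int) : String :=
  if PySem.Str.len text ≤ limit then text
  else String.ofList (PySem.Chars.slice text.toList none (some (limit - 3)) ++ "...".toList)

-- the for-loop of A with early return, carrying (fitted, current_height)
def pvFitLoopA (rem : List String) (fitted : List String) (cur : Int)
    (mh lhv sp : Int) : List String :=
  match rem with
  | [] => fitted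
  | line :: rest =>
    let additional := if fitted.isEmpty then lhv else lhv + sp
    if cur + additional > mh then
      if fitted.isEmpty then fitted
      else fitted.dropLast ++
        [pvTruncateA (fitted.getLastD "") (max 8 (PySem.Str.len (fitted.getLastD "") - 1))]
    else pvFitLoopA rest (fitted ++ [line]) (cur + additional) mh lhv sp

def fit_lines_to_height (lines : List String) (max_height : Int) (line_height_value : Int) (spacing : Int) : List String :=
  if lines.isEmpty then [""]
  else pvFitLoopA lines [] 0 max_height line_height_value spacing

-- ===== PORT B =====
-- B's direct truncation of the last kept line
def pvTruncLastB (last : String) : String :=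
  if PySem.Str.len last ≤ 8 then last
  else String.ofList (PySem.Chars.slice last.toList none (some (PySem.Str.len last - 4)) ++ "...".toList)

-- k is a Nat index (Source B's k is a nonnegative int: budget // d ≥ 0 when it is used)
def fit_lines_to_height_alt (lines : List String) (max_height : Int) (line_height_value : Int) (spacing : Int) : List String :=
  if lines.isEmpty then [""]
  else
    let n := lines.length
    let d := line_height_value + spacing
    let budget := max_height - line_height_value
    let k : Nat :=
      if budget < 0 then 0
      else if d ≤ 0 then n
      else min n ((PySem.Int.floordiv budget d).toNat + 1)
    if k == n then lines
    else
      let fitted := lines.take k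
      if fitted.isEmpty then fitted
      else fitted.dropLast ++ [pvTruncLastB (fitted.getLastD "")]

-- ===== PRECONDITION & SPEC =====
def Spec_fit_lines_to_height (lines : List String) (max_height : Int) (line_height_value : Int) (spacing : Int) (out : List String) : Prop := out = fit_lines_to_height_alt lines max_height line_height_value spacing
instance (lines : List String) (max_height : Int) (line_height_value : Int) (spacing : Int) (out : List String) : Decidable (Spec_fit_lines_to_height lines max_height line_height_value spacing out) := by unfold Spec_fit_lines_to_height; infer_instance

-- ===== CLAIM (what is proved, stated in full; the proofs are below) =====
def Claim_equal_fit_lines_to_height : Prop := ∀ (lines : List String) (max_height : Int) (line_height_value : Int) (spacing : Int), Dom_fit_lines_to_height lines max_height line_height_value spacing → Spec_fit_lines_to_height lines max_height line_height_value spacing (fit_lines_to_height lines max_height line_height_value spacing)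

-- ===== LEMMAS AND PROOFS =====

-- A's truncate at limit max(8, len-1) is exactly B's direct truncation
theorem pvTrunc_eq (s : String) :
    pvTruncateA s (max 8 (PySem.Str.len s - 1)) = pvTruncLastB s := by
  unfold pvTruncateA pvTruncLastB
  simp only [pysem]
  have hsl : s.length = s.toList.length := rfl
  by_cases h : (s.toList.length : Int) ≤ 8
  · rw [max_eq_left (by omega)]
    rw [if_pos (by omega), if_pos (by omega)]
  · rw [max_eq_right (by omega)]
    rw [if_neg (by omega), if_neg (by omega)]
    have he : ((s.toList.length : Int) - 1 - 3) = (s.toList.length : Int) - 4 := by ring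
    rw [he]

-- the final truncation step A performs on a nonempty fitted prefix, in B's form
def pvFin (xs : List String) : List String :=
  xs.dropLast ++ [pvTruncLastB (xs.getLastD "")]

-- A's loop with a nonempty accumulator equals the search over the remaining
-- closed-form heights cur + (i+1)*(lhv+sp)
theorem pvLoop_eq (mh lhv sp : Int) :
    ∀ (rem fitted : List String) (cur : Int), fitted ≠ [] →
      pvFitLoopA rem fitted cur mh lhv sp =
        match ((List.range rem.length).map
            (fun (i : Nat) => cur + ((i : Int) + 1) * (lhv + sp))).findIdx?
            (fun h => h > mh) with
        | none => fitted ++ rem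
        | some j => pvFin (fitted ++ rem.take j) := by
  intro rem
  induction rem with
  | nil => intro fitted cur _; simp [pvFitLoopA]
  | cons line rest ih =>
    intro fitted cur hne
    have hfe : fitted.isEmpty = false := by simp [hne]
    rw [pvFitLoopA]
    simp only [hfe, if_false, Bool.false_eq_true]
    rw [List.length_cons, List.range_succ_eq_map, List.map_cons, List.map_map,
        List.findIdx?_cons]
    by_cases hov : cur + (lhv + sp) > mh
    · simp only [Nat.cast_zero, zero_add, one_mul]
      rw [if_pos hov, if_pos (decide_eq_true hov)]
      simp only [List.take_zero, List.append_nil, pvFin]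
      rw [pvTrunc_eq]
    · simp only [Nat.cast_zero, zero_add, one_mul]
      rw [if_neg hov]
      rw [ih (fitted ++ [line]) (cur + (lhv + sp)) (by simp)]
      have hmap : (List.range rest.length).map
            ((fun (i : Nat) => cur + ((i : Int) + 1) * (lhv + sp)) ∘ Nat.succ) =
          (List.range rest.length).map
            (fun (i : Nat) => (cur + (lhv + sp)) + ((i : Int) + 1) * (lhv + sp)) := by
        apply List.map_congr_left
        intro i _
        simp [Function.comp, Nat.succ_eq_add_one]
        ring
      rw [hmap]
      cases hfind : ((List.range rest.length).map
          (fun (i : Nat) => (cur + (lhv + sp)) + ((i : Int) + 1) * (lhv + sp))).findIdx?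
          (fun h => h > mh) with
      | none => simp [decide_eq_false hov]
      | some j => simp [decide_eq_false hov, List.append_assoc]

-- findIdx? over a mapped range whose predicate is a threshold on the index
theorem findIdx?_map_range_threshold {α : Type} :
    ∀ (m : Nat) (f : Nat → α) (p : α → Bool) (t : Nat),
      (∀ i, p (f i) = decide (t ≤ i)) →
      ((List.range m).map f).findIdx? p = if t < m then some t else none := by
  intro m
  induction m with
  | zero => intro f p t _; simp
  | succ m ih =>
    intro f p t hp
    rw [List.range_succ_eq_map, List.map_cons, List.map_map, List.findIdx?_cons]
    cases t with
    | zero =>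
      rw [hp 0]
      simp
    | succ s =>
      rw [hp 0]
      simp only [Nat.succ_le_iff, Nat.not_lt_zero, decide_false, Bool.false_eq_true,
        if_false]
      rw [ih (f ∘ Nat.succ) p s (by intro i; rw [Function.comp_apply, hp (i + 1)]; simp)]
      by_cases h : s < m
      · rw [if_pos h, if_pos (by omega)]
        rfl
      · rw [if_neg h, if_neg (by omega)]
        rfl

-- ===== VERDICT (by name: the statement is the Claim_ definition above) =====
theorem fit_lines_to_height_spec : Claim_equal_fit_lines_to_height := by
  intro lines mh lhv sp _
  unfold Spec_fit_lines_to_height fit_lines_to_height fit_lines_to_height_alt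
  cases lines with
  | nil => simp
  | cons l rest =>
    simp only [List.isEmpty_cons, if_false, Bool.false_eq_true]
    rw [pvFitLoopA]
    simp only [List.isEmpty_nil, if_true, zero_add]
    by_cases hneg : mh - lhv < 0
    · -- budget < 0: A overflows on the first line, both return []
      rw [if_pos (by omega)]
      simp only [if_pos hneg]
      rw [if_neg (by simp [List.length_cons])]
      simp
    · rw [if_neg (by omega)]
      simp only [if_neg hneg, List.nil_append]
      rw [pvLoop_eq mh lhv sp rest [l] lhv (by simp)]
      by_cases hd : lhv + sp ≤ 0
      · -- step ≤ 0: no later line can overflow; both return all lines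
        simp only [if_pos hd]
        have hnone : ((List.range rest.length).map
            (fun (i : Nat) => lhv + ((i : Int) + 1) * (lhv + sp))).findIdx?
            (fun h => h > mh) = none := by
          rw [List.findIdx?_eq_none_iff]
          intro x hx
          simp only [List.mem_map, List.mem_range] at hx
          obtain ⟨i, _, rfl⟩ := hx
          have hmul : ((i : Int) + 1) * (lhv + sp) ≤ 0 :=
            mul_nonpos_of_nonneg_of_nonpos (by positivity) hd
          simp only [decide_eq_false_iff_not, not_lt]
          omega
        rw [hnone]
        simp
      · -- step > 0: the first overflow index is the floor-division threshold
        have hd : 0 < lhv + sp := by omega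
        simp only [if_neg (by omega : ¬ lhv + sp ≤ 0)]
        set d := lhv + sp with hdd
        set q := PySem.Int.floordiv (mh - lhv) d with hq
        have hql : q * d ≤ mh - lhv := by
          have := (PySem.Int.le_floordiv_iff_mul_le (a := mh - lhv) (b := d) (q := q) hd).mp
            (le_refl q)
          exact this
        have hqu : mh - lhv < (q + 1) * d := by
          have := (PySem.Int.floordiv_lt_iff_lt_mul (a := mh - lhv) (b := d) (q := q + 1) hd).mp
            (by omega)
          exact this
        have hq0 : 0 ≤ q := by
          rw [hq]
          exact (PySem.Int.le_floordiv_iff_mul_le hd).mpr (by omega)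
        have hcast : ((q.toNat : Int)) = q := Int.toNat_of_nonneg hq0
        have hpred : ∀ i : Nat,
            (decide ((lhv + ((i : Int) + 1) * d) > mh)) = decide (q.toNat ≤ i) := by
          intro i
          by_cases hge : q.toNat ≤ i
          · have h1 : (q + 1) * d ≤ ((i : Int) + 1) * d :=
              mul_le_mul_of_nonneg_right (by omega) (by omega)
            simp only [hge, decide_true]
            apply decide_eq_true
            omega
          · have h1 : ((i : Int) + 1) * d ≤ q * d :=
              mul_le_mul_of_nonneg_right (by omega) (by omega)
            simp only [hge, decide_false]
            apply decide_eq_false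
            omega
        rw [findIdx?_map_range_threshold rest.length
            (fun (i : Nat) => lhv + ((i : Int) + 1) * d) (fun h => h > mh) q.toNat hpred]
        by_cases hlt : q.toNat < rest.length
        · rw [if_pos hlt]
          have hmin : min (l :: rest).length (q.toNat + 1) = q.toNat + 1 := by
            simp only [List.length_cons]; omega
          rw [hmin]
          rw [if_neg (by simp only [List.length_cons, beq_iff_eq]; omega)]
          simp only [List.take_succ_cons]
          simp [pvFin]
        · rw [if_neg hlt]
          have hmin : min (l :: rest).length (q.toNat + 1) = (l :: rest).length := by
            simp only [List.length_cons]; omega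
          rw [hmin]
          simp
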